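-- pv_equiv track=rewrite | github.com/SRWS-PSG/search-formula-developper | scripts/conversion/ovid/converter.py | _is_fully_parenthesized
-- ===== SOURCE A (Python) =====
-- def _is_fully_parenthesized(text: str) -> bool:
--     text = text.strip()
--     if not (text.startswith("(") and text.endswith(")")):
--         return False
--     depth = 0
--     for i, char in enumerate(text):
--         if char == "(":
--             depth += 1
--         elif char == ")":
--             depth -= 1
--             if depth == 0 and i < len(text) - 1:
--                 return False
--     return depth == 0
-- ===== SOURCE B (Python) =====
-- def _is_fully_parenthesized(text: str) -> bool:
--     text = text.strip()
--     if not (text.startswith("(") and text.endswith(")")):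
--         return False
--     return _balanced(text) and _balanced(text[1:-1])
--
--
-- def _balanced(s: str) -> bool:
--     p = "".join(c for c in s if c in "()")
--     while "()" in p:
--         p = p.replace("()", "")
--     return p == ""
-- ===== Notes on version B (the rewrite author's own statement) =====
-- stated objective: alternative
-- what changed: Replaced A's early-return depth-counter scan by pair-cancellation: after the strip and outer-char guard, B keeps only the parentheses and repeatedly deletes adjacent open-close parenthesis pairs (str.replace in a while loop); the text is fully parenthesized iff both the whole string and its interior text[1:-1] reduce to the empty string.
import Mathlib
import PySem

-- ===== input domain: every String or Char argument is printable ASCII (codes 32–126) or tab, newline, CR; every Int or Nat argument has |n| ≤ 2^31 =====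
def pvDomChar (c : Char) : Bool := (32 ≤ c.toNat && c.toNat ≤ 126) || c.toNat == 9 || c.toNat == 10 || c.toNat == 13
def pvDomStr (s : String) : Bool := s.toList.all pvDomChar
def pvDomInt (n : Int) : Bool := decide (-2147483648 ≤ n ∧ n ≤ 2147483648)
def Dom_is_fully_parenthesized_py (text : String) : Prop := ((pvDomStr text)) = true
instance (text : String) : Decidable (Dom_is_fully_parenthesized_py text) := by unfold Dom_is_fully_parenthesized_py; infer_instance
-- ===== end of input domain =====

-- B replaces A's depth-counter scan by pair-cancellation: the string is fully parenthesized iff the guard holds and both the string and its interior reduce to empty by repeatedly deleting adjacent open-close pairs; alternative algorithm, same return value.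


-- ===== PORT A =====
-- A's scan with early return, ported as structural recursion over the char list
-- carrying the index i, the total length n, and depth.
def pvLoopA (l : List Char) (i n depth : Int) : Bool :=
  match l with
  | [] => depth == 0
  | c :: rest =>
    if c = '(' then pvLoopA rest (i + 1) n (depth + 1)
    else if c = ')' then
      if depth - 1 == 0 && decide (i < n - 1) then false
      else pvLoopA rest (i + 1) n (depth - 1)
    else pvLoopA rest (i + 1) n depth

def is_fully_parenthesized_py (text : String) : Bool :=
  let t := PySem.Str.strip text
  if !(PySem.Str.startswith t "(" && PySem.Str.endswith t ")") then false
  else pvLoopA t.toList 0 (PySem.Str.len t) 0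

-- ===== PORT B =====
-- B: keep only parentheses, then repeatedly delete adjacent open-close pairs
-- (str.replace with the two-char pattern, applied while the pattern occurs);
-- balanced iff the reduction empties the string.
def pvIsParen (c : Char) : Bool := c == '(' || c == ')'

-- one pass of str.replace deleting the two-char open-close pattern: left-to-right, non-overlapping — exact
def pvRAll : List Char → List Char
  | [] => []
  | [c] => [c]
  | c :: d :: r => if c = '(' ∧ d = ')' then pvRAll r else c :: pvRAll (d :: r)

-- the 'in' substring test for the two-char open-close pattern, exact
def pvHasOcc : List Char → Bool
  | [] => false
  | [_] => false
  | c :: d :: r => (c = '(' ∧ d = ')') || pvHasOcc (d :: r)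

-- termination lemmas for the while loop (cited by pvReduceLoop's decreasing_by)
theorem pvRAll_le (p : List Char) : (pvRAll p).length ≤ p.length := by
  induction p using pvRAll.induct with
  | case1 => simp [pvRAll]
  | case2 c => simp [pvRAll]
  | case3 c d r h ih => simp only [pvRAll, if_pos h]; simp; omega
  | case4 c d r h ih => simp only [pvRAll, if_neg h]; simpa using Nat.succ_le_succ ih

theorem pvRAll_lt (p : List Char) (h : pvHasOcc p = true) : (pvRAll p).length < p.length := by
  induction p using pvRAll.induct with
  | case1 => simp [pvHasOcc] at h
  | case2 c => simp [pvHasOcc] at h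
  | case3 c d r hc ih =>
    simp only [pvRAll, if_pos hc]
    have := pvRAll_le r; simp; omega
  | case4 c d r hc ih =>
    simp only [pvRAll, if_neg hc]
    simp only [pvHasOcc, Bool.or_eq_true, decide_eq_true_eq] at h
    have h2 : pvHasOcc (d :: r) = true := by
      rcases h with h1 | h1
      · exact absurd h1 hc
      · exact h1
    simpa using Nat.succ_lt_succ (ih h2)

-- the while loop of B: replace while the pattern occurs
def pvReduceLoop (p : List Char) : List Char :=
  if h : pvHasOcc p = true then pvReduceLoop (pvRAll p) else p
termination_by p.length
decreasing_by exact pvRAll_lt p h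

def pvBalanced (s : List Char) : Bool :=
  pvReduceLoop (s.filter pvIsParen) == []

def is_fully_parenthesized_py_alt (text : String) : Bool :=
  let t := PySem.Str.strip text
  if !(PySem.Str.startswith t "(" && PySem.Str.endswith t ")") then false
  else
    -- t[1:-1] = (t.toList.drop 1).dropLast, exact for every length
    pvBalanced t.toList && pvBalanced ((t.toList.drop 1).dropLast)

-- ===== PRECONDITION & SPEC =====
def Spec_is_fully_parenthesized_py (text : String) (out : Bool) : Prop := out = is_fully_parenthesized_py_alt text
instance (text : String) (out : Bool) : Decidable (Spec_is_fully_parenthesized_py text out) := by unfold Spec_is_fully_parenthesized_py; infer_instance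

-- ===== CLAIM (what is proved, stated in full; the proofs are below) =====
def Claim_equal_is_fully_parenthesized_py : Prop := ∀ (text : String), Dom_is_fully_parenthesized_py text → Spec_is_fully_parenthesized_py text (is_fully_parenthesized_py text)

-- ===== LEMMAS AND PROOFS =====

def pvDelta (c : Char) : Int := if c = '(' then 1 else if c = ')' then -1 else 0

-- A's early-return condition, expressed recursively (depth ≥ 1 before the last char, 0 at the end)
def pvGood (l : List Char) (depth : Int) : Bool :=
  match l with
  | [] => depth == 0
  | c :: rest =>
    if rest.isEmpty then pvGood rest (depth + pvDelta c)
    else decide (1 ≤ depth + pvDelta c) && pvGood rest (depth + pvDelta c)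

-- the Dyck condition: every prefix depth ≥ 0 and final depth 0, starting from d
def pvOk (l : List Char) (d : Int) : Bool :=
  match l with
  | [] => d == 0
  | c :: rest => decide (0 ≤ d + pvDelta c) && pvOk rest (d + pvDelta c)

-- A's scan equals the recursive predicate, under the invariant depth ≥ 1 and i + |l| = n.
theorem pvLoopA_eq (l : List Char) (i n depth : Int)
    (hd : 1 ≤ depth) (hn : i + l.length = n) :
    pvLoopA l i n depth = pvGood l depth := by
  induction l generalizing i depth with
  | nil => simp [pvLoopA, pvGood]
  | cons c rest ih =>
    have hlen : i + 1 + (rest.length : Int) = n := by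
      simp only [List.length_cons] at hn; push_cast at hn ⊢; omega
    by_cases hp : c = '('
    · subst hp
      rw [show pvLoopA ('(' :: rest) i n depth = pvLoopA rest (i + 1) n (depth + 1) from by
            simp [pvLoopA],
          show pvGood ('(' :: rest) depth
            = (if rest.isEmpty then pvGood rest (depth + 1)
               else decide (1 ≤ depth + 1) && pvGood rest (depth + 1)) from by
            simp [pvGood, pvDelta]]
      cases rest with
      | nil => simp [pvLoopA, pvGood]
      | cons c2 r2 =>
        rw [ih (i + 1) (depth + 1) (by omega) hlen]
        simp [(by omega : (1:Int) ≤ depth + 1)]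
    · by_cases hq : c = ')'
      · subst hq
        rw [show pvLoopA (')' :: rest) i n depth
              = (if depth - 1 == 0 && decide (i < n - 1) then false
                 else pvLoopA rest (i + 1) n (depth - 1)) from by simp [pvLoopA],
            show pvGood (')' :: rest) depth
              = (if rest.isEmpty then pvGood rest (depth - 1)
                 else decide (1 ≤ depth - 1) && pvGood rest (depth - 1)) from by
              simp [pvGood, pvDelta, sub_eq_add_neg]]
        cases rest with
        | nil =>
          have hni : ¬ i < n - 1 := by
            simp only [List.length_nil] at hlen; omega
          simp [pvLoopA, pvGood, hni]
        | cons c2 r2 =>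
          have hi : i < n - 1 := by
            have hL : ((c2 :: r2).length : Int) = (r2.length : Int) + 1 := by
              push_cast [List.length_cons]; ring
            omega
          by_cases hz : depth - 1 = 0
          · rw [if_pos (by simp [hz, hi]), if_neg (by simp)]
            simp [hz]
          · rw [if_neg (by simp [hz]), if_neg (by simp),
              ih (i + 1) (depth - 1) (by omega) hlen]
            simp [(by omega : (1:Int) ≤ depth - 1)]
      · rw [show pvLoopA (c :: rest) i n depth = pvLoopA rest (i + 1) n depth from by
              simp [pvLoopA, hp, hq],
            show pvGood (c :: rest) depth
              = (if rest.isEmpty then pvGood rest depth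
                 else decide (1 ≤ depth) && pvGood rest depth) from by
              simp [pvGood, pvDelta, hp, hq]]
        cases rest with
        | nil => simp [pvLoopA, pvGood]
        | cons c2 r2 =>
          rw [ih (i + 1) depth hd hlen]
          simp [hd]

-- deleting adjacent open-close pairs preserves the Dyck condition (for d ≥ 0)
theorem pvOk_rAll (p : List Char) (d : Int) (hd : 0 ≤ d) :
    pvOk (pvRAll p) d = pvOk p d := by
  induction p using pvRAll.induct generalizing d with
  | case1 => rfl
  | case2 c => rfl
  | case3 c d' r h ih =>
    obtain ⟨h1, h2⟩ := h; subst h1; subst h2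
    rw [show pvRAll ('(' :: ')' :: r) = pvRAll r from by simp [pvRAll], ih d hd]
    have e : pvOk ('(' :: ')' :: r) d
        = (decide (0 ≤ d + 1) && (decide (0 ≤ d + 1 + -1) && pvOk r (d + 1 + -1))) := by
      simp [pvOk, pvDelta]
    rw [e, show d + 1 + -1 = d from by ring]
    simp [show (0:Int) ≤ d + 1 from by omega, hd]
  | case4 c d' r h ih =>
    rw [show pvRAll (c :: d' :: r) = c :: pvRAll (d' :: r) from by simp [pvRAll, h]]
    by_cases hge : 0 ≤ d + pvDelta c
    · simp only [pvOk, ih (d + pvDelta c) hge]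
    · simp [pvOk, hge]

-- dropping non-parenthesis characters preserves the Dyck condition (for d ≥ 0)
theorem pvOk_filter (l : List Char) (d : Int) (hd : 0 ≤ d) :
    pvOk (l.filter pvIsParen) d = pvOk l d := by
  induction l generalizing d with
  | nil => rfl
  | cons c r ih =>
    by_cases hp : pvIsParen c = true
    · rw [List.filter_cons_of_pos hp]
      by_cases hge : 0 ≤ d + pvDelta c
      · simp only [pvOk, ih (d + pvDelta c) hge]
      · simp [pvOk, hge]
    · have hd0 : pvDelta c = 0 := by
        simp only [pvIsParen, Bool.or_eq_true, beq_iff_eq] at hp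
        rw [not_or] at hp
        simp [pvDelta, hp.1, hp.2]
      rw [List.filter_cons_of_neg hp]
      simp [pvOk, hd0, hd, ih d hd]

theorem pvRAll_parens (p : List Char) (h : p.all pvIsParen = true) :
    (pvRAll p).all pvIsParen = true := by
  induction p using pvRAll.induct with
  | case1 => rfl
  | case2 c => exact h
  | case3 c d r hc ih =>
    obtain ⟨h1, h2⟩ := hc; subst h1; subst h2
    simp only [List.all_cons, Bool.and_eq_true] at h
    rw [show pvRAll ('(' :: ')' :: r) = pvRAll r from by simp [pvRAll]]
    exact ih h.2.2
  | case4 c d r hc ih =>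
    simp only [List.all_cons, Bool.and_eq_true] at h
    rw [show pvRAll (c :: d :: r) = c :: pvRAll (d :: r) from by simp [pvRAll, hc]]
    simp only [List.all_cons, Bool.and_eq_true]
    refine ⟨h.1, ih ?_⟩
    simp only [List.all_cons, Bool.and_eq_true]
    exact h.2

-- a paren-only string with no open-close occurrence starting with an open paren is all opens
theorem pvOpensOnly (p : List Char) (hpar : p.all pvIsParen = true)
    (hno : pvHasOcc p = false) (hh : p.head? = some '(') :
    p.all (fun c => c = '(') = true := by
  induction p with
  | nil => rfl
  | cons c r ih =>
    simp only [List.head?_cons, Option.some.injEq] at hh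
    subst hh
    cases r with
    | nil => simp
    | cons c2 r2 =>
      simp only [List.all_cons, Bool.and_eq_true] at hpar
      have hno2 : pvHasOcc (c2 :: r2) = false := by
        simp only [pvHasOcc, Bool.or_eq_false_iff] at hno
        exact hno.2
      have hc2 : c2 = '(' := by
        simp only [pvIsParen, Bool.or_eq_true, beq_iff_eq] at hpar
        rcases hpar.2.1 with h | h
        · exact h
        · exfalso
          rw [h] at hno
          simp [pvHasOcc] at hno
      have hall2 : (c2 :: r2).all pvIsParen = true := by
        simp only [List.all_cons, Bool.and_eq_true]
        exact hpar.2
      have := ih hall2 hno2 (by simp [hc2])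
      simp only [List.all_cons, Bool.and_eq_true, decide_eq_true_eq] at this ⊢
      exact ⟨by trivial, this⟩

theorem pvOkOpens (p : List Char) (d : Int) (hd : 0 ≤ d)
    (hall : p.all (fun c => c = '(') = true) (hok : pvOk p d = true) : p = [] := by
  induction p generalizing d with
  | nil => rfl
  | cons c r ih =>
    simp only [List.all_cons, Bool.and_eq_true, decide_eq_true_eq] at hall
    obtain ⟨hc, hall⟩ := hall; subst hc
    have hδ : pvDelta '(' = 1 := by simp [pvDelta]
    simp only [pvOk, hδ, Bool.and_eq_true, decide_eq_true_eq] at hok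
    have hr := ih (d + 1) (by omega) hall hok.2
    subst hr
    simp only [pvOk, beq_iff_eq] at hok
    exact absurd hok.2 (by omega)

theorem pvOkz (p : List Char) (hpar : p.all pvIsParen = true)
    (hno : pvHasOcc p = false) (hok : pvOk p 0 = true) : p = [] := by
  cases hp : p with
  | nil => rfl
  | cons c r =>
    subst hp
    have hpar' := hpar
    simp only [List.all_cons, Bool.and_eq_true, pvIsParen, Bool.or_eq_true, beq_iff_eq] at hpar'
    rcases hpar'.1 with h | h
    · exact pvOkOpens (c :: r) 0 le_rfl (pvOpensOnly (c :: r) hpar hno (by simp [h])) hok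
    · subst h
      simp [pvOk, pvDelta] at hok

-- the while loop empties the paren string exactly when the Dyck condition holds
theorem pvLoop_spec_aux (n : Nat) (p : List Char) (hn : p.length ≤ n)
    (hpar : p.all pvIsParen = true) :
    (pvReduceLoop p == []) = pvOk p 0 := by
  induction n generalizing p with
  | zero =>
    have hp : p = [] := by
      cases p with
      | nil => rfl
      | cons c r => simp at hn
    subst hp
    rw [show pvReduceLoop [] = [] from by rw [pvReduceLoop]; simp [pvHasOcc]]
    rfl
  | succ n ih =>
    by_cases h : pvHasOcc p = true
    · have hlt := pvRAll_lt p h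
      rw [show pvReduceLoop p = pvReduceLoop (pvRAll p) from by rw [pvReduceLoop]; simp [h],
        ih (pvRAll p) (by omega) (pvRAll_parens p hpar), pvOk_rAll p 0 le_rfl]
    · rw [show pvReduceLoop p = p from by rw [pvReduceLoop]; simp [h]]
      cases hok : pvOk p 0 with
      | true =>
        rw [pvOkz p hpar (by simpa using h) hok]; rfl
      | false =>
        cases hp : p with
        | nil => subst hp; simp [pvOk] at hok
        | cons c r => simp

theorem pvLoop_spec (p : List Char) (hpar : p.all pvIsParen = true) :
    (pvReduceLoop p == []) = pvOk p 0 :=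
  pvLoop_spec_aux p.length p le_rfl hpar

theorem pvBalanced_ok (s : List Char) : pvBalanced s = pvOk s 0 := by
  rw [pvBalanced, pvLoop_spec (s.filter pvIsParen) (by simp [List.all_filter]),
    pvOk_filter s 0 le_rfl]

-- removing the closing ')' at the end: pvGood / pvOk bridges
theorem pvGood_close (mid : List Char) (d : Int) (hd : 1 ≤ d) :
    pvGood (mid ++ [')']) d = pvOk mid (d - 1) := by
  induction mid generalizing d with
  | nil => simp [pvGood, pvOk, pvDelta, sub_eq_add_neg]
  | cons c r ih =>
    rw [show (c :: r) ++ [')'] = c :: (r ++ [')']) from rfl]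
    have hne : (r ++ [')']).isEmpty = false := by simp
    rw [show pvGood (c :: (r ++ [')'])) d
          = (decide (1 ≤ d + pvDelta c) && pvGood (r ++ [')']) (d + pvDelta c)) from by
        simp [pvGood, hne]]
    by_cases hge : 1 ≤ d + pvDelta c
    · rw [ih (d + pvDelta c) hge]
      have h0 : (0 ≤ d - 1 + pvDelta c) := by omega
      rw [show pvOk (c :: r) (d - 1)
            = (decide (0 ≤ d - 1 + pvDelta c) && pvOk r (d - 1 + pvDelta c)) from rfl,
        show d + pvDelta c - 1 = d - 1 + pvDelta c from by ring]
      simp [hge, h0]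
    · have h0 : ¬ (0 ≤ d - 1 + pvDelta c) := by omega
      rw [show pvOk (c :: r) (d - 1)
            = (decide (0 ≤ d - 1 + pvDelta c) && pvOk r (d - 1 + pvDelta c)) from rfl]
      simp [hge, h0]

theorem pvOk_wrap_aux (mid : List Char) (d : Int) (hok : pvOk mid d = true) :
    pvOk (mid ++ [')']) (d + 1) = true := by
  induction mid generalizing d with
  | nil =>
    have hd0 : d = 0 := by simpa [show pvOk [] d = (d == 0) from rfl] using hok
    subst hd0
    decide
  | cons c r ih =>
    simp only [pvOk, Bool.and_eq_true, decide_eq_true_eq] at hok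
    obtain ⟨hge, hr⟩ := hok
    rw [show (c :: r) ++ [')'] = c :: (r ++ [')']) from rfl]
    rw [show pvOk (c :: (r ++ [')'])) (d + 1)
          = (decide (0 ≤ d + 1 + pvDelta c) && pvOk (r ++ [')']) (d + 1 + pvDelta c)) from rfl]
    have h1 : (0 ≤ d + 1 + pvDelta c) := by omega
    have h2 := ih (d + pvDelta c) hr
    have h3 : (0 ≤ d + pvDelta c + 1) := by omega
    rw [show d + 1 + pvDelta c = d + pvDelta c + 1 from by ring]
    simp [h3, h2]

-- guard-shape: a stripped string passing the guard is '(' :: mid ++ [')']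
theorem pvShape (t : String)
    (hg : (PySem.Str.startswith t "(" && PySem.Str.endswith t ")") = true) :
    ∃ mid, t.toList = '(' :: mid ++ [')'] := by
  obtain ⟨hs, he⟩ := Bool.and_eq_true_iff.mp hg
  have hpre : "(".toList <+: t.toList := by
    apply (PySem.Chars.startswith_iff t.toList "(".toList).mp
    simpa using hs
  have hsuf : ")".toList <:+ t.toList := by
    apply (PySem.Chars.endswith_iff t.toList ")".toList).mp
    simpa using he
  obtain ⟨rest, hrest⟩ := hpre
  obtain ⟨pre, hpreq⟩ := hsuf
  have htl : t.toList = '(' :: rest := by simpa using hrest.symm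
  cases hp : pre with
  | nil =>
    subst hp
    rw [htl] at hpreq
    simp at hpreq
  | cons c pre' =>
    subst hp
    have h2 : '(' :: rest = c :: (pre' ++ [')']) := by
      rw [← htl]
      simpa using hpreq.symm
    obtain ⟨hc, hrest2⟩ := List.cons_eq_cons.mp h2
    exact ⟨pre', by simp [htl, hrest2]⟩

-- main bridge
theorem pvMain (t : String) :
    (if !(PySem.Str.startswith t "(" && PySem.Str.endswith t ")") then false
     else pvLoopA t.toList 0 (PySem.Str.len t) 0)
    = (if !(PySem.Str.startswith t "(" && PySem.Str.endswith t ")") then false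
       else pvBalanced t.toList && pvBalanced ((t.toList.drop 1).dropLast)) := by
  by_cases hg : (PySem.Str.startswith t "(" && PySem.Str.endswith t ")") = true
  · rw [hg]
    simp only [Bool.not_true, Bool.false_eq_true, if_false]
    obtain ⟨mid, hmid⟩ := pvShape t hg
    have hn : PySem.Str.len t = ((('(' :: mid ++ [')']).length : Nat) : Int) := by
      rw [PySem.Str.len_eq, ← hmid]
    rw [hmid, hn]
    -- A side: one step, then pvLoopA_eq and pvGood_close
    have hA : pvLoopA ('(' :: mid ++ [')']) 0 ((('(' :: mid ++ [')']).length : Nat) : Int) 0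
        = pvOk mid 0 := by
      rw [show pvLoopA ('(' :: mid ++ [')']) 0 ((('(' :: mid ++ [')']).length : Nat) : Int) 0
            = pvLoopA (mid ++ [')']) 1 ((('(' :: mid ++ [')']).length : Nat) : Int) 1 from by
          simp [pvLoopA],
        pvLoopA_eq (mid ++ [')']) 1 _ 1 (by omega) (by simp; ring),
        pvGood_close mid 1 le_rfl]
      norm_num
    -- B side: both balanced checks via pvOk, the outer one collapses
    have hdrop : (('(' :: mid ++ [')']).drop 1).dropLast = mid := by
      simp
    have hB : (pvBalanced ('(' :: mid ++ [')']) && pvBalanced ((('(' :: mid ++ [')']).drop 1).dropLast))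
        = pvOk mid 0 := by
      rw [hdrop, pvBalanced_ok, pvBalanced_ok]
      cases hok : pvOk mid 0 with
      | false => simp
      | true =>
        have hw := pvOk_wrap_aux mid 0 hok
        rw [show pvOk ('(' :: mid ++ [')']) 0
              = (decide (0 ≤ (0:Int) + pvDelta '(') && pvOk (mid ++ [')']) (0 + pvDelta '(')) from rfl,
          show (0:Int) + pvDelta '(' = 0 + 1 from by simp [pvDelta], hw]
        decide
    rw [hA, hB]
  · simp only [Bool.not_eq_true] at hg
    rw [hg]
    rfl

-- ===== VERDICT (by name: the statement is the Claim_ definition above) =====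
theorem is_fully_parenthesized_py_spec : Claim_equal_is_fully_parenthesized_py := by
  intro text _
  exact pvMain (PySem.Str.strip text)
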